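-- pv_equiv track=rewrite | github.com/karishmathakrar/arc-mediqa-magic-2025 | inference.py | clean_generated_answer
-- ===== SOURCE A (Python) =====
-- def clean_generated_answer(text):
--     """Clean up the generated answer text."""
--     lines = text.strip().split('\n')
--     model_content = False
--     answer_lines = []
--
--     for line in lines:
--         if '<start_of_turn>model' in line or line.strip() == "model":
--             model_content = True
--             continue
--         if model_content and line.strip() and not line.startswith("<") and not any(tag in line for tag in ["start_of_turn", "end_of_turn"]):
--             answer_lines.append(line.strip())
--
--     # If we found model content, return it
--     if answer_lines:
--         return " ".join(answer_lines)
--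
--     # If all else fails, return the last non-empty line
--     for line in reversed(lines):
--         if line.strip() and not line.startswith("<") and not any(tag in line for tag in ["start_of_turn", "end_of_turn"]):
--             return line.strip()
--
--     return ""
-- ===== SOURCE B (Python) =====
-- def clean_generated_answer(text):
--     """Clean up the generated answer text (single pass)."""
--     model_content = False
--     answer_lines = []
--     last_valid = ""
--     for line in text.strip().split('\n'):
--         stripped = line.strip()
--         if stripped and not line.startswith("<") and "start_of_turn" not in line and "end_of_turn" not in line:
--             last_valid = stripped
--         if '<start_of_turn>model' in line or stripped == "model":
--             model_content = True
--         elif model_content and stripped and not line.startswith("<") and "start_of_turn" not in line and "end_of_turn" not in line: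
--             answer_lines.append(stripped)
--     return " ".join(answer_lines) if answer_lines else last_valid
-- ===== Notes on version B (the rewrite author's own statement) =====
-- stated objective: alternative
-- what changed: B makes a single forward pass that maintains the model-content answer lines and a running last-valid-line fallback together, instead of A's two passes (forward collection plus a separate reversed fallback scan).
import Mathlib
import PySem

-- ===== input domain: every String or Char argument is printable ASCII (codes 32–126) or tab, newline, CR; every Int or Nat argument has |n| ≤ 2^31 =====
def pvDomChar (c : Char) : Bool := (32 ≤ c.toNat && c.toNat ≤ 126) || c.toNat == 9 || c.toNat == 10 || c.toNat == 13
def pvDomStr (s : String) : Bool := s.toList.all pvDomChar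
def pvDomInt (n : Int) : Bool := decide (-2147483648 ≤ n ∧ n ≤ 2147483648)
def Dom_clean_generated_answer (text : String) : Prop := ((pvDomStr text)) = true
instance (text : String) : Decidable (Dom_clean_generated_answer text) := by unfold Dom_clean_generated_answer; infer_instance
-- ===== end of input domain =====

-- B folds the fallback "last valid line" into the single forward pass instead of A's separate reversed scan (alternative decomposition, same cost).


-- ===== PORT A =====
-- A's forward collection loop, one step ('model_content', 'answer_lines')
def pvStepA (st : Bool × List String) (line : String) : Bool × List String :=
  if PySem.Str.isIn "<start_of_turn>model" line || (PySem.Str.strip line == "model") then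
    (true, st.2)
  else if st.1 && (PySem.Str.strip line != "") && !(PySem.Str.startswith line "<")
        && !(PySem.Str.isIn "start_of_turn" line || PySem.Str.isIn "end_of_turn" line) then
    (st.1, st.2 ++ [PySem.Str.strip line])
  else st

-- A's second loop: 'for line in reversed(lines): if …: return line.strip()', else ""
def pvAfallback : List String → String
  | [] => ""
  | line :: rest =>
    if (PySem.Str.strip line != "") && !(PySem.Str.startswith line "<")
        && !(PySem.Str.isIn "start_of_turn" line || PySem.Str.isIn "end_of_turn" line) then
      PySem.Str.strip line
    else pvAfallback rest

def clean_generated_answer (text : String) : String :=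
  let lines := (PySem.Str.split? (PySem.Str.strip text) "\n").getD []
  let st := lines.foldl pvStepA (false, [])
  if st.2.isEmpty then pvAfallback lines.reverse
  else PySem.Str.join " " st.2

-- ===== PORT B =====
-- B's single-pass step: state (model_content, answer_lines, last_valid)
def pvStepB (st : Bool × List String × String) (line : String) : Bool × List String × String :=
  let stripped := PySem.Str.strip line
  let lv := if (stripped != "") && !(PySem.Str.startswith line "<")
      && !(PySem.Str.isIn "start_of_turn" line) && !(PySem.Str.isIn "end_of_turn" line) then
      stripped else st.2.2
  if PySem.Str.isIn "<start_of_turn>model" line || (stripped == "model") then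
    (true, st.2.1, lv)
  else if st.1 && (stripped != "") && !(PySem.Str.startswith line "<")
      && !(PySem.Str.isIn "start_of_turn" line) && !(PySem.Str.isIn "end_of_turn" line) then
    (st.1, st.2.1 ++ [stripped], lv)
  else (st.1, st.2.1, lv)

def clean_generated_answer_alt (text : String) : String :=
  let st := ((PySem.Str.split? (PySem.Str.strip text) "\n").getD []).foldl pvStepB (false, [], "")
  if st.2.1.isEmpty then st.2.2 else PySem.Str.join " " st.2.1

-- ===== PRECONDITION & SPEC =====
def Spec_clean_generated_answer (text : String) (out : String) : Prop := out = clean_generated_answer_alt text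
instance (text : String) (out : String) : Decidable (Spec_clean_generated_answer text out) := by unfold Spec_clean_generated_answer; infer_instance

-- ===== CLAIM (what is proved, stated in full; the proofs are below) =====
def Claim_equal_clean_generated_answer : Prop := ∀ (text : String), Dom_clean_generated_answer text → Spec_clean_generated_answer text (clean_generated_answer text)

-- ===== LEMMAS AND PROOFS =====
-- the fallback predicate shared by A's reversed scan and B's running last_valid
def pvOk (line : String) : Bool :=
  (PySem.Str.strip line != "") && !(PySem.Str.startswith line "<")
    && !(PySem.Str.isIn "start_of_turn" line) && !(PySem.Str.isIn "end_of_turn" line)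

theorem pvStepB_eq (b : Bool) (ans : List String) (lv : String) (line : String) :
    pvStepB (b, ans, lv) line =
      ((pvStepA (b, ans) line).1, (pvStepA (b, ans) line).2,
        if pvOk line then PySem.Str.strip line else lv) := by
  simp only [pvStepA, pvStepB, pvOk, Bool.not_or, ← Bool.and_assoc]
  split_ifs <;> simp_all

theorem pvFoldB_eq (lines : List String) (b : Bool) (ans : List String) (lv : String) :
    lines.foldl pvStepB (b, ans, lv) =
      ((lines.foldl pvStepA (b, ans)).1, (lines.foldl pvStepA (b, ans)).2,
        lines.foldl (fun lv line => if pvOk line then PySem.Str.strip line else lv) lv) := by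
  induction lines generalizing b ans lv with
  | nil => rfl
  | cons x xs ih =>
    simp only [List.foldl_cons, pvStepB_eq]
    rw [ih]

theorem pvFoldLv_eq (lines : List String) (lv : String) :
    lines.foldl (fun lv line => if pvOk line then PySem.Str.strip line else lv) lv =
      match lines.reverse.find? pvOk with
      | some l => PySem.Str.strip l
      | none => lv := by
  induction lines generalizing lv with
  | nil => rfl
  | cons x xs ih =>
    simp only [List.foldl_cons, ih, List.reverse_cons, List.find?_append]
    cases h : xs.reverse.find? pvOk with
    | some l => rfl
    | none =>
      simp only [List.find?_cons, List.find?_nil]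
      cases hx : pvOk x <;> rfl

theorem pvAcond_eq (line : String) :
    ((PySem.Str.strip line != "") && !(PySem.Str.startswith line "<")
      && !(PySem.Str.isIn "start_of_turn" line || PySem.Str.isIn "end_of_turn" line))
    = pvOk line := by
  unfold pvOk
  cases h1 : (PySem.Str.strip line != "") <;> cases h2 : PySem.Str.startswith line "<" <;>
    cases h3 : PySem.Str.isIn "start_of_turn" line <;> cases h4 : PySem.Str.isIn "end_of_turn" line <;> rfl

theorem pvAfallback_eq (ls : List String) :
    pvAfallback ls = match ls.find? pvOk with
      | some l => PySem.Str.strip l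
      | none => "" := by
  induction ls with
  | nil => rfl
  | cons x xs ih =>
    simp only [pvAfallback, pvAcond_eq, List.find?_cons]
    cases h : pvOk x
    · exact ih
    · rfl

-- ===== VERDICT (by name: the statement is the Claim_ definition above) =====
theorem clean_generated_answer_spec : Claim_equal_clean_generated_answer := by
  intro text _
  unfold Spec_clean_generated_answer clean_generated_answer clean_generated_answer_alt
  generalize (PySem.Str.split? (PySem.Str.strip text) "\n").getD [] = L
  rw [pvFoldB_eq]
  dsimp only
  rw [pvAfallback_eq, pvFoldLv_eq]
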